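-- pv_equiv track=rewrite | github.com/TimButters/advent-of-code | 2024/day-15/python/p2_solution.py | is_in_obstacle
-- ===== SOURCE A (Python) =====
-- Point = tuple[int, int]
--
-- def is_in_obstacle(coord: Point, obstacles: set[tuple[Point, Point]]):
--     x, y = coord
--     if coord in [ob[0] for ob in obstacles]:
--         return ((x, y), (x + 1, y))
--     elif coord in [ob[1] for ob in obstacles]:
--         return ((x - 1, y), (x, y))
--     else:
--         return None
-- ===== SOURCE B (Python) =====
-- Point = tuple[int, int]
--
-- def is_in_obstacle(coord: Point, obstacles: set[tuple[Point, Point]]):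
--     x, y = coord
--     right_match = False
--     for a, b in obstacles:
--         if coord == a:
--             return ((x, y), (x + 1, y))
--         if coord == b:
--             right_match = True
--     return ((x - 1, y), (x, y)) if right_match else None
-- ===== Notes on version B (the rewrite author's own statement) =====
-- stated objective: alternative
-- what changed: Replaces A's two list-comprehension passes (build a list of all left halves, test membership, then build a list of all right halves, test membership) with one single loop over the obstacles that returns immediately on a left-half hit and records right-half hits in a flag, resolved after the loop.
import Mathlib
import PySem

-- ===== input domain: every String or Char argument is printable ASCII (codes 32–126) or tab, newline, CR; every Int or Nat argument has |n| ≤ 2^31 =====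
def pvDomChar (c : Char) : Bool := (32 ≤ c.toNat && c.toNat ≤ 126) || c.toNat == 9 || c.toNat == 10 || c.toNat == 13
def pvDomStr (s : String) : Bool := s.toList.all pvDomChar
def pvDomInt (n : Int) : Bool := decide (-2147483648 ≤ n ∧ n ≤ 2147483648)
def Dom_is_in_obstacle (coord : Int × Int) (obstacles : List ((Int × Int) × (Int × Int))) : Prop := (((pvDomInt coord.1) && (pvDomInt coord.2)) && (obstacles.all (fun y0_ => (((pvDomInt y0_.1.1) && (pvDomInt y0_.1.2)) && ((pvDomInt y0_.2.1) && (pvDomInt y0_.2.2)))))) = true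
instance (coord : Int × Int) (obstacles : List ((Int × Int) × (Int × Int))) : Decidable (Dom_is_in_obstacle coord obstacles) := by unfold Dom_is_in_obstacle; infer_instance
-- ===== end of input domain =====

-- B replaces A's two list-comprehension membership passes with one single-pass loop (early return on a left-half hit, flag for right-half hits): an alternative decomposition, same O(n) cost.

-- ===== PORT A =====
def is_in_obstacle (coord : Int × Int) (obstacles : List ((Int × Int) × (Int × Int))) : Option ((Int × Int) × (Int × Int)) :=
  let x := coord.1
  let y := coord.2
  if coord ∈ obstacles.map Prod.fst then
    some ((x, y), (x + 1, y))
  else if coord ∈ obstacles.map Prod.snd then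
    some ((x - 1, y), (x, y))
  else
    none

-- ===== PORT B =====
-- B-side loop: single pass, early return on a left-half hit, flag for right-half hits
def altLoop (coord : Int × Int) (obstacles : List ((Int × Int) × (Int × Int))) (rightMatch : Bool) : Option ((Int × Int) × (Int × Int)) :=
  match obstacles with
  | [] => if rightMatch then some ((coord.1 - 1, coord.2), (coord.1, coord.2)) else none
  | (a, b) :: rest =>
      if coord = a then some ((coord.1, coord.2), (coord.1 + 1, coord.2))
      else altLoop coord rest (rightMatch || decide (coord = b))

def is_in_obstacle_alt (coord : Int × Int) (obstacles : List ((Int × Int) × (Int × Int))) : Option ((Int × Int) × (Int × Int)) :=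
  altLoop coord obstacles false

-- ===== PRECONDITION & SPEC =====
def Spec_is_in_obstacle (coord : Int × Int) (obstacles : List ((Int × Int) × (Int × Int))) (out : Option ((Int × Int) × (Int × Int))) : Prop := out = is_in_obstacle_alt coord obstacles
instance (coord : Int × Int) (obstacles : List ((Int × Int) × (Int × Int))) (out : Option ((Int × Int) × (Int × Int))) : Decidable (Spec_is_in_obstacle coord obstacles out) := by unfold Spec_is_in_obstacle; infer_instance

-- ===== CLAIM (what is proved, stated in full; the proofs are below) =====
def Claim_equal_is_in_obstacle : Prop := ∀ (coord : Int × Int) (obstacles : List ((Int × Int) × (Int × Int))), Dom_is_in_obstacle coord obstacles → Spec_is_in_obstacle coord obstacles (is_in_obstacle coord obstacles)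

-- ===== LEMMAS AND PROOFS =====
theorem altLoop_char (coord : Int × Int) (obstacles : List ((Int × Int) × (Int × Int))) (rm : Bool) :
    altLoop coord obstacles rm =
      if coord ∈ obstacles.map Prod.fst then some ((coord.1, coord.2), (coord.1 + 1, coord.2))
      else if rm = true ∨ coord ∈ obstacles.map Prod.snd then some ((coord.1 - 1, coord.2), (coord.1, coord.2))
      else none := by
  induction obstacles generalizing rm with
  | nil => cases rm <;> simp [altLoop]
  | cons hd tl ih =>
      obtain ⟨a, b⟩ := hd
      by_cases h : coord = a
      · simp [altLoop, h]
      · simp only [altLoop, if_neg h, ih, List.map_cons, List.mem_cons]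
        by_cases hb : coord = b <;> cases rm <;> simp [h, hb] <;> split_ifs <;> simp_all

-- ===== VERDICT (by name: the statement is the Claim_ definition above) =====
theorem is_in_obstacle_spec : Claim_equal_is_in_obstacle := by
  intro coord obstacles _
  unfold Spec_is_in_obstacle is_in_obstacle is_in_obstacle_alt
  rw [altLoop_char]
  simp only [Bool.false_eq_true, false_or]
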